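-- pv_equiv track=rewrite | github.com/Univers42/scripts | norm_align.py | visual_col
-- ===== SOURCE A (Python) =====
-- TAB_W = 4
--
-- def visual_col(s):
--     """Compute the visual column width of a string containing tabs."""
--     col = 0
--     for c in s:
--         if c == '\t':
--             col = ((col // TAB_W) + 1) * TAB_W
--         else:
--             col += 1
--     return col
-- ===== SOURCE B (Python) =====
-- TAB_W = 4
--
-- def visual_col(s):
--     """Compute the visual column width of a string containing tabs."""
--     pieces = s.split('\t')
--     col = len(pieces[0])
--     for piece in pieces[1:]:
--         col = ((col // TAB_W) + 1) * TAB_W + len(piece)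
--     return col
-- ===== Notes on version B (the rewrite author's own statement) =====
-- stated objective: simpler
-- what changed: Replaced the per-character scan with a split on the tab character: add each piece's length to the column and apply the tab-stop rounding once between consecutive pieces.
import Mathlib
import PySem

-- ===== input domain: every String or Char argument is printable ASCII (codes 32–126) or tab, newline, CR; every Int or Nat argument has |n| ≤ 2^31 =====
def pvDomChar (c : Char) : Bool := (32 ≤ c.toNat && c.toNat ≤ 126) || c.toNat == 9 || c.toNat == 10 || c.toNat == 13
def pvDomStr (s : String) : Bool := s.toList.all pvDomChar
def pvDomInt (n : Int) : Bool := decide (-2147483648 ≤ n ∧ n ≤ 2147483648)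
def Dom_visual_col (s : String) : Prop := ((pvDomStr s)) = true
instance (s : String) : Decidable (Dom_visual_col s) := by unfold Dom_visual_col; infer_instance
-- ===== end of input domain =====

-- B replaces A's per-character scan by splitting on '\t' and adding piece lengths,
-- rounding to the next tab stop once between consecutive pieces (objective: simpler).

-- ===== PORT A =====
-- literal port of A: fold over the characters, tab rounds up to the next multiple of TAB_W
def visual_col (s : String) : Int :=
  s.toList.foldl
    (fun col c => if c = '\t' then (PySem.Int.floordiv col 4 + 1) * 4 else col + 1) 0

-- ===== PORT B =====
-- literal port of B: pieces = s.split('\t'); start from len(pieces[0]); for each later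
-- piece round to the next tab stop and add its length (headI totalizes pieces[0];
-- split of a string is never empty, proved below)
def visual_col_alt (s : String) : Int :=
  let pieces := s.toList.splitOn '\t'
  (pieces.drop 1).foldl
    (fun col piece => (PySem.Int.floordiv col 4 + 1) * 4 + (piece.length : Int))
    ((pieces.headI.length : Int))

-- ===== PRECONDITION & SPEC =====
def Spec_visual_col (s : String) (out : Int) : Prop := out = visual_col_alt s
instance (s : String) (out : Int) : Decidable (Spec_visual_col s out) := by unfold Spec_visual_col; infer_instance

-- ===== CLAIM (what is proved, stated in full; the proofs are below) =====
def Claim_equal_visual_col : Prop := ∀ (s : String), Dom_visual_col s → Spec_visual_col s (visual_col s)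

-- ===== LEMMAS AND PROOFS =====

-- key invariant: A's character fold from any column equals B's piece-wise computation
theorem visual_col_fold_eq_split (cs : List Char) (col : Int) :
    cs.foldl
      (fun col c => if c = '\t' then (PySem.Int.floordiv col 4 + 1) * 4 else col + 1) col
    = ((cs.splitOn '\t').drop 1).foldl
        (fun col piece => (PySem.Int.floordiv col 4 + 1) * 4 + (piece.length : Int))
        (col + ((cs.splitOn '\t').headI.length : Int)) := by
  induction cs generalizing col with
  | nil => simp [List.splitOn]
  | cons c cs ih =>
      obtain ⟨p, rest, hsplit⟩ : ∃ p rest, cs.splitOn '\t' = p :: rest := by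
        rcases h : cs.splitOn '\t' with _ | ⟨p, rest⟩
        · exact absurd h (List.splitOnP_ne_nil _ cs)
        · exact ⟨p, rest, rfl⟩
      by_cases hc : c = '\t'
      · subst hc
        have h1 : (('\t' :: cs).splitOn '\t') = [] :: cs.splitOn '\t' := by
          simp [List.splitOn, List.splitOnP_cons]
        rw [List.foldl_cons, if_pos rfl, ih, h1, hsplit]
        simp
      · have h1 : ((c :: cs).splitOn '\t') = (c :: p) :: rest := by
          simp [List.splitOn, List.splitOnP_cons, hc]
          simp [List.splitOn] at hsplit
          simp [hsplit]
        rw [List.foldl_cons, if_neg hc, ih, h1, hsplit]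
        simp only [List.headI_cons, List.drop_one, List.tail_cons]
        congr 1
        simp
        omega

-- ===== VERDICT (by name: the statement is the Claim_ definition above) =====
theorem visual_col_spec : Claim_equal_visual_col := by
  intro s _
  unfold Spec_visual_col visual_col visual_col_alt
  simpa using visual_col_fold_eq_split s.toList 0
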